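-- pv_equiv track=rewrite | github.com/SSC-ICT-Innovatie/LearningLion | ingester/libraries/preprocessor.py | get_footer
-- ===== SOURCE A (Python) =====
-- def get_footer(text):
--
-- 		splitted = text.split(" ")
-- 		footer = []
-- 		splitted.reverse()
-- 		if splitted[0].isdigit():
-- 				splitted.pop(0) # Remove page number
-- 		for split in splitted:
-- 				if "Tweede" in split:
-- 						footer.append(split)
-- 						footer.reverse()
-- 						return " ".join(footer)
-- 				else:
-- 						footer.append(split)
-- 		return ""
-- ===== SOURCE B (Python) =====
-- def get_footer(text):
--     words = text.split(" ")
--     if words[-1].isdigit():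
--         words = words[:-1]  # Remove page number
--     buf = None
--     for w in words:
--         if "Tweede" in w:
--             buf = [w]
--         elif buf is not None:
--             buf.append(w)
--     return "" if buf is None else " ".join(buf)
-- ===== Notes on version B (the rewrite author's own statement) =====
-- stated objective: simpler
-- what changed: Single forward pass that restarts a buffer at every word containing 'Tweede', instead of reversing the word list, scanning it backwards with an accumulator and reversing the accumulator again.
import Mathlib
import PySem

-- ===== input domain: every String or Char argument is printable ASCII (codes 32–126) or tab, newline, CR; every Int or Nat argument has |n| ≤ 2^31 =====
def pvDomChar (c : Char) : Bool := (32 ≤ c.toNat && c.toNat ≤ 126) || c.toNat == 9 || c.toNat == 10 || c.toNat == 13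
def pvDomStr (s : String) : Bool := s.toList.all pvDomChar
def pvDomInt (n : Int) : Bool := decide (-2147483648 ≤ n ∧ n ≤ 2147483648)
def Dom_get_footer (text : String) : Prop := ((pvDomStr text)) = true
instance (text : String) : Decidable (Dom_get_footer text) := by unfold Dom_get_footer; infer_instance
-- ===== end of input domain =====

-- B replaces A's reverse/scan-backwards/reverse-again accumulator with one forward pass
-- keeping a buffer that restarts at each word containing "Tweede" (objective: simpler).


-- ===== PORT A =====
-- A's for-loop over the reversed word list with accumulator `footer`
def pvALoop (footer : List String) (l : List String) : String :=
  match l with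
  | [] => ""
  | w :: t =>
    if PySem.Str.isIn "Tweede" w then
      PySem.Str.join " " ((footer ++ [w]).reverse)
    else
      pvALoop (footer ++ [w]) t

def get_footer (text : String) : String :=
  -- sep " " is non-empty, so Python's split never raises: split? is always `some`
  match (PySem.Str.split? text " ").getD [] |>.reverse with
  | [] => ""  -- unreachable: str.split(" ") always returns a nonempty list (Python would raise IndexError)
  | w0 :: t =>
    let rs := if PySem.Str.strIsdigit w0 then t else w0 :: t
    pvALoop [] rs

-- ===== PORT B =====
-- one step of B's forward pass: restart the buffer at a "Tweede" word, else extend it if started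
def pvBStep (buf : Option (List String)) (w : String) : Option (List String) :=
  if PySem.Str.isIn "Tweede" w then some [w]
  else match buf with
  | none => none
  | some b => some (b ++ [w])

def get_footer_alt (text : String) : String :=
  -- sep " " is non-empty, so Python's split never raises: split? is always `some`
  let words := (PySem.Str.split? text " ").getD []
  match words.getLast? with
  | none => ""  -- unreachable: str.split(" ") always returns a nonempty list (Python would raise IndexError)
  | some wl =>
    let words2 := if PySem.Str.strIsdigit wl then words.dropLast else words
    match words2.foldl pvBStep none with
    | none => ""
    | some b => PySem.Str.join " " b

-- ===== PRECONDITION & SPEC =====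
def Spec_get_footer (text : String) (out : String) : Prop := out = get_footer_alt text
instance (text : String) (out : String) : Decidable (Spec_get_footer text out) := by unfold Spec_get_footer; infer_instance

-- ===== CLAIM (what is proved, stated in full; the proofs are below) =====
def Claim_equal_get_footer : Prop := ∀ (text : String), Dom_get_footer text → Spec_get_footer text (get_footer text)

-- ===== LEMMAS AND PROOFS =====

-- A's backward scan over l.reverse computes B's forward fold over l (with acc generalised).
theorem pvALoop_eq_fold (l : List String) : ∀ (acc : List String),
    pvALoop acc l.reverse =
      match l.foldl pvBStep none with
      | none => ""
      | some b => PySem.Str.join " " (b ++ acc.reverse) := by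
  induction l using List.reverseRecOn with
  | nil => intro acc; simp [pvALoop]
  | append_singleton l a ih =>
    intro acc
    rw [List.reverse_append, List.foldl_append]
    simp only [List.reverse_singleton, List.singleton_append, List.foldl_cons, List.foldl_nil,
      pvALoop, pvBStep]
    by_cases h : PySem.Str.isIn "Tweede" a = true
    · rw [if_pos h, if_pos h]; simp
    · rw [if_neg h, if_neg h]
      rw [ih (acc ++ [a])]
      cases l.foldl pvBStep none with
      | none => rfl
      | some b => simp

theorem get_footer_eq (text : String) : get_footer text = get_footer_alt text := by
  rcases List.eq_nil_or_concat ((PySem.Str.split? text " ").getD []) with h | ⟨l', a, h⟩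
  · simp [get_footer, get_footer_alt, h]
  · rw [List.concat_eq_append] at h
    by_cases hd : PySem.Str.strIsdigit a = true
    · simp only [get_footer, get_footer_alt, h, List.reverse_append, List.reverse_singleton,
        List.singleton_append, List.getLast?_concat, List.dropLast_concat, hd, if_true]
      rw [pvALoop_eq_fold l' []]
      cases l'.foldl pvBStep none with
      | none => rfl
      | some b => simp
    · simp only [get_footer, get_footer_alt, h, List.reverse_append, List.reverse_singleton,
        List.singleton_append, List.getLast?_concat, List.dropLast_concat]
      rw [if_neg hd, if_neg hd]
      have h2 : a :: l'.reverse = (l' ++ [a]).reverse := by simp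
      rw [h2, pvALoop_eq_fold (l' ++ [a]) []]
      cases (l' ++ [a]).foldl pvBStep none with
      | none => rfl
      | some b => simp

-- ===== VERDICT (by name: the statement is the Claim_ definition above) =====
theorem get_footer_spec : Claim_equal_get_footer := by
  intro text _
  unfold Spec_get_footer
  exact get_footer_eq text
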